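-- pv_equiv track=rewrite | github.com/ioannapap/spatial_data_management | part3.py | putOrder
-- ===== SOURCE A (Python) =====
-- def putOrder(aList, x, y, distance):
--
-- 	if len(aList)==0:
-- 		aList.insert(len(aList), [x, y, distance])
-- 		return aList
--
-- 	place=0
-- 	for a in aList:
--
-- 		if distance<=a[2]:
-- 			aList.insert(place, [x, y, distance])
-- 			return aList
-- 		else:
-- 			place+=1
--
-- 	if [x, y, distance] not in a:
-- 		aList.insert(len(aList), [x, y, distance])
-- 		return aList
-- ===== SOURCE B (Python) =====
-- def putOrder(aList, x, y, distance):
--     rest = aList[::-1]            # reversed copy, used as a stack (front element on top)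
--     prefix = []
--     while rest and rest[-1][2] < distance:
--         prefix.append(rest.pop())
--     aList[:] = prefix + [[x, y, distance]] + rest[::-1]
--     return aList
-- ===== Notes on version B (the rewrite author's own statement) =====
-- stated objective: alternative
-- what changed: Instead of A's counter-driven scan with an in-loop insert, an empty-list special case and a dead membership branch, B partitions the list by popping the nearer points off a reversed copy used as a stack and rebuilds the whole list as prefix + [new point] + rest by concatenation.
import Mathlib
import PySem

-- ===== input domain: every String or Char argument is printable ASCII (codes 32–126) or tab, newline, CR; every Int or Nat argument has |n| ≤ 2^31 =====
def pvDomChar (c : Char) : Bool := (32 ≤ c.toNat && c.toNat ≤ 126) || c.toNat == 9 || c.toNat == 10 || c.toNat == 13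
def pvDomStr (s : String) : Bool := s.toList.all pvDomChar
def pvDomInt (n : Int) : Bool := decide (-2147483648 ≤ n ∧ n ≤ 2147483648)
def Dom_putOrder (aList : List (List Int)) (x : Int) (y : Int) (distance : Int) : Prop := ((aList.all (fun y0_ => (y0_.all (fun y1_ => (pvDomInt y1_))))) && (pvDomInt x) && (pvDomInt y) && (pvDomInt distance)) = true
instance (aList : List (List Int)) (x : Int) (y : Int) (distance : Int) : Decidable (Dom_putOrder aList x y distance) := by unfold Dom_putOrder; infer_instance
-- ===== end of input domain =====

-- B partitions the list by popping the nearer points off a reversed copy used as a stack and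
-- rebuilds it by concatenation, instead of A's counter-driven scan with an in-loop insert.
-- Both Pythons mutate aList in place identically; the theorems below are about the RETURN value.

-- ===== PORT A =====
-- the for-loop of A: `rest` is what remains to scan, `place` the running counter
def pvLoopA (aList : List (List Int)) (xyd : List Int) (distance : Int) : List (List Int) → Nat → List (List Int)
  | [], _ => aList ++ [xyd]
      -- after the loop A tests `[x, y, distance] not in a`; `a` is a list of ints, which can never
      -- contain the 3-element list, so the test is always True and A appends (exact on Dom)
  | a :: rest, place =>
    match PySem.List.pyGet? a 2 with
    | none => []   -- a[2] raises IndexError in Python; excluded by Pre_putOrder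
    | some v =>
      if distance ≤ v then PySem.List.insert aList (place : Int) xyd
      else pvLoopA aList xyd distance rest (place + 1)

def putOrder (aList : List (List Int)) (x : Int) (y : Int) (distance : Int) : List (List Int) :=
  if aList.length = 0 then aList ++ [[x, y, distance]]
  else pvLoopA aList [x, y, distance] distance aList 0

-- ===== PORT B =====
-- Source B's while loop: `rest` is aList reversed (front element last); rest[-1] is its getLast,
-- rest.pop() drops it (dropLast); a short rest[-1] makes rest[-1][2] raise IndexError (excluded by Pre_)
def pvLoopB (distance : Int) (pre : List (List Int)) (rest : List (List Int)) : List (List Int) × List (List Int) :=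
  if hne : rest = [] then (pre, rest)
  else
    match PySem.List.pyGet? (rest.getLast hne) 2 with
    | none => ([], [])   -- rest[-1][2] raises IndexError in Python; excluded by Pre_putOrder
    | some v =>
      if v < distance then pvLoopB distance (pre ++ [rest.getLast hne]) rest.dropLast
      else (pre, rest)
termination_by rest.length
decreasing_by
  cases rest with
  | nil => exact absurd rfl hne
  | cons b t => simp [List.length_dropLast]

def putOrder_alt (aList : List (List Int)) (x : Int) (y : Int) (distance : Int) : List (List Int) :=
  let pr := pvLoopB distance [] aList.reverse
  pr.1 ++ [[x, y, distance]] ++ pr.2.reverse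

-- ===== PRECONDITION & SPEC =====
-- Pre_ excludes exactly the inputs on which the Python A raises IndexError: those where the scan
-- reaches an entry with fewer than 3 fields before finding the insertion point (B raises there too).
def Pre_putOrder (aList : List (List Int)) (x : Int) (y : Int) (distance : Int) : Prop :=
  ∀ i < aList.length, (aList.getD i []).length < 3 →
    ∃ j < i, distance ≤ (aList.getD j []).getD 2 0
instance (aList : List (List Int)) (x : Int) (y : Int) (distance : Int) : Decidable (Pre_putOrder aList x y distance) := by unfold Pre_putOrder; infer_instance

def pvWitness_putOrder : List (List Int) × Int × Int × Int := ([[0, 0, 1], [1, 1, 4]], 2, 2, 2)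

def Spec_putOrder (aList : List (List Int)) (x : Int) (y : Int) (distance : Int) (out : List (List Int)) : Prop := out = putOrder_alt aList x y distance
instance (aList : List (List Int)) (x : Int) (y : Int) (distance : Int) (out : List (List Int)) : Decidable (Spec_putOrder aList x y distance out) := by unfold Spec_putOrder; infer_instance

-- ===== CLAIM (what is proved, stated in full; the proofs are below) =====
def Claim_equal_putOrder : Prop := ∀ (aList : List (List Int)) (x : Int) (y : Int) (distance : Int), Dom_putOrder aList x y distance → Pre_putOrder aList x y distance → Spec_putOrder aList x y distance (putOrder aList x y distance)

-- ===== LEMMAS AND PROOFS =====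

-- the insertion index both programs find: first entry whose stored distance is ≥ distance
def pvIdx (distance : Int) (l : List (List Int)) : Nat :=
  l.findIdx (fun a => decide (distance ≤ a.getD 2 0))

theorem pvIdx_le_length (distance : Int) (l : List (List Int)) : pvIdx distance l ≤ l.length := by
  simpa [pvIdx] using List.findIdx_le_length (p := fun (a : List Int) => decide (distance ≤ a.getD 2 0)) (xs := l)

theorem pvIdx_cons (distance : Int) (a : List Int) (l : List (List Int)) :
    pvIdx distance (a :: l) = if distance ≤ a.getD 2 0 then 0 else pvIdx distance l + 1 := by
  simp [pvIdx, List.findIdx_cons]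

theorem pvIdx_lt_false (distance : Int) (l : List (List Int)) (i : Nat)
    (h : i < pvIdx distance l) : ¬ distance ≤ (l.getD i []).getD 2 0 := by
  induction l generalizing i with
  | nil => simp [pvIdx] at h
  | cons a l ih =>
    rw [pvIdx_cons] at h
    by_cases hp : distance ≤ a.getD 2 0
    · rw [if_pos hp] at h; exact absurd h (Nat.not_lt_zero i)
    · rw [if_neg hp] at h
      cases i with
      | zero => simpa using hp
      | succ i => exact ih i (by omega)

theorem pyGet2_of_len (a : List Int) (h : 3 ≤ a.length) :
    PySem.List.pyGet? a 2 = some (a.getD 2 0) := by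
  match a, h with
  | a0 :: a1 :: a2 :: t, _ =>
    rw [show (2 : Int) = ((2 : Nat) : Int) from rfl, PySem.List.pyGet?_natCast]
    simp

-- entries up to the insertion point have their three fields (what both loops actually inspect)
def pvGood (distance : Int) (l : List (List Int)) : Prop :=
  ∀ i, i < l.length → i ≤ pvIdx distance l → 3 ≤ (l.getD i []).length

theorem pvGood_tail (distance : Int) (a : List Int) (t : List (List Int))
    (hg : pvGood distance (a :: t)) (hp : ¬ distance ≤ a.getD 2 0) : pvGood distance t := by
  intro i hi hik
  have := hg (i + 1) (by simp; omega) (by rw [pvIdx_cons, if_neg hp]; omega)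
  simpa using this

theorem pvLoopA_eq (aList : List (List Int)) (xyd : List Int) (distance : Int)
    (rest : List (List Int)) (place : Nat)
    (hg : pvGood distance rest)
    (hpl : place + rest.length = aList.length) :
    pvLoopA aList xyd distance rest place
      = PySem.List.insert aList ((place + pvIdx distance rest : Nat) : Int) xyd := by
  induction rest generalizing place with
  | nil =>
    simp only [List.length_nil, Nat.add_zero] at hpl
    subst hpl
    rw [pvLoopA]
    rw [PySem.List.insert_natCast aList (aList.length + pvIdx distance []) xyd (by simp [pvIdx])]
    simp [pvIdx]
  | cons a rest ih =>
    rw [pvLoopA, pyGet2_of_len a (hg 0 (by simp) (Nat.zero_le _))]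
    dsimp only
    by_cases hp : distance ≤ a.getD 2 0
    · rw [if_pos hp, pvIdx_cons, if_pos hp]; norm_num
    · rw [if_neg hp, pvIdx_cons, if_neg hp,
        ih (place + 1) (pvGood_tail distance a rest hg hp)
          (by simp only [List.length_cons] at hpl; omega)]
      congr 1
      omega

theorem pvLoopB_eq (distance : Int) (l : List (List Int)) (pre : List (List Int))
    (hg : pvGood distance l) :
    pvLoopB distance pre l.reverse
      = (pre ++ l.take (pvIdx distance l), (l.drop (pvIdx distance l)).reverse) := by
  induction l generalizing pre with
  | nil => rw [List.reverse_nil, pvLoopB]; simp [pvIdx]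
  | cons a t ih =>
    rw [List.reverse_cons, pvLoopB, dif_neg (by simp)]
    simp only [List.getLast_concat]
    rw [pyGet2_of_len a (hg 0 (by simp) (Nat.zero_le _))]
    dsimp only
    by_cases hp : distance ≤ a.getD 2 0
    · rw [if_neg (by omega), pvIdx_cons, if_pos hp]
      simp
    · rw [if_pos (by omega), List.dropLast_concat,
        ih (pre ++ [a]) (pvGood_tail distance a t hg hp), pvIdx_cons, if_neg hp]
      simp

-- ===== VERDICT (by name: the statement is the Claim_ definition above) =====
theorem putOrder_spec : Claim_equal_putOrder := by
  intro aList x y distance _hDom hPre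
  unfold Spec_putOrder putOrder putOrder_alt
  have hg : pvGood distance aList := by
    intro i hi hik
    by_contra hshort
    obtain ⟨j, hj, hmatch⟩ := hPre i hi (by omega)
    exact pvIdx_lt_false distance aList j (by omega) hmatch
  by_cases hnil : aList.length = 0
  · have hn : aList = [] := List.length_eq_zero_iff.mp hnil
    subst hn
    rw [List.reverse_nil, pvLoopB]
    simp
  · rw [if_neg hnil,
      pvLoopA_eq aList [x, y, distance] distance aList 0 hg (Nat.zero_add _),
      Nat.zero_add,
      PySem.List.insert_natCast aList (pvIdx distance aList) [x, y, distance]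
        (pvIdx_le_length distance aList)]
    show _ = (pvLoopB distance [] aList.reverse).1 ++ [[x, y, distance]] ++ (pvLoopB distance [] aList.reverse).2.reverse
    rw [pvLoopB_eq distance aList [] hg]
    simp
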